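-- pv_equiv track=rewrite | github.com/Raminyazdani/cv_generator | src/cv_generator/ensure.py | match_list_items
-- ===== SOURCE A (Python) =====
-- from typing import Any, Dict, List, Optional, Set, Tuple
--
-- def get_item_identity(item: Dict[str, Any], context: str) -> Optional[str]:
--     """
--     Get a stable identity for a list item to match across languages.
--
--     Args:
--         item: The dictionary item
--         context: The context path (e.g., 'projects', 'experiences')
--
--     Returns:
--         A stable identity string, or None if no identity can be determined.
--     """
--     if not isinstance(item, dict):
--         return None
--
--     # For projects: prefer url, then title
--     if "url" in item and item["url"]:
--         return f"url:{item['url']}"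
--     if "URL" in item and item["URL"]:
--         return f"url:{item['URL']}"
--     if "title" in item and item["title"]:
--         return f"title:{item['title']}"
--
--     # For experiences: role + institution + duration
--     if all(k in item for k in ("role", "institution", "duration")):
--         return f"exp:{item['role']}|{item['institution']}|{item['duration']}"
--
--     # For publications: doi or title
--     if "doi" in item and item["doi"]:
--         return f"doi:{item['doi']}"
--
--     # For references: email or name
--     if "email" in item and item["email"]:
--         emails = item["email"] if isinstance(item["email"], list) else [item["email"]]
--         if emails:
--             return f"email:{emails[0]}"
--     if "name" in item:
--         return f"name:{item['name']}"
--
--     return None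
--
-- def match_list_items(
--     en_list: List[Any],
--     other_list: List[Any],
--     context: str
-- ) -> List[Tuple[int, Optional[int], Optional[str]]]:
--     """
--     Match items between English and another language list.
--
--     Returns:
--         List of tuples (en_index, other_index or None, match_method)
--         If other_index is None, the item is missing.
--     """
--     matches = []
--     used_other_indices: Set[int] = set()
--
--     for en_idx, en_item in enumerate(en_list):
--         en_identity = get_item_identity(en_item, context) if isinstance(en_item, dict) else None
--
--         matched_idx = None
--         match_method = None
--
--         if en_identity:
--             # Try to find by identity
--             for other_idx, other_item in enumerate(other_list):
--                 if other_idx in used_other_indices: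
--                     continue
--                 other_identity = get_item_identity(other_item, context) if isinstance(other_item, dict) else None
--                 if other_identity == en_identity:
--                     matched_idx = other_idx
--                     match_method = "identity"
--                     break
--
--         # Fall back to index matching
--         if matched_idx is None and en_idx < len(other_list):
--             if en_idx not in used_other_indices:
--                 matched_idx = en_idx
--                 match_method = "index"
--
--         if matched_idx is not None:
--             used_other_indices.add(matched_idx)
--
--         matches.append((en_idx, matched_idx, match_method))
--
--     return matches
-- ===== SOURCE B (Python) =====
-- from typing import Any, Dict, List, Optional, Tuple
--
-- def get_item_identity(item: Dict[str, Any], context: str) -> Optional[str]: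
--     if not isinstance(item, dict):
--         return None
--     if "url" in item and item["url"]:
--         return f"url:{item['url']}"
--     if "URL" in item and item["URL"]:
--         return f"url:{item['URL']}"
--     if "title" in item and item["title"]:
--         return f"title:{item['title']}"
--     if all(k in item for k in ("role", "institution", "duration")):
--         return f"exp:{item['role']}|{item['institution']}|{item['duration']}"
--     if "doi" in item and item["doi"]:
--         return f"doi:{item['doi']}"
--     if "email" in item and item["email"]:
--         emails = item["email"] if isinstance(item["email"], list) else [item["email"]]
--         if emails:
--             return f"email:{emails[0]}"
--     if "name" in item:
--         return f"name:{item['name']}"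
--     return None
--
-- def match_list_items(
--     en_list: List[Any],
--     other_list: List[Any],
--     context: str
-- ) -> List[Tuple[int, Optional[int], Optional[str]]]:
--     # Queue-based matching with lazy deletion: index other_list once into
--     # per-identity queues of indices (kept reversed so list.pop() removes the
--     # smallest remaining index); indices consumed by the index-fallback are
--     # deleted lazily when they surface at the end of a queue.
--     queues: Dict[str, List[int]] = {}
--     for j, other_item in enumerate(other_list):
--         ident = get_item_identity(other_item, context) if isinstance(other_item, dict) else None
--         if ident is not None:
--             queues.setdefault(ident, []).append(j)
--     for q in queues.values():
--         q.reverse()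
--
--     used = set()
--     out = []
--     m = len(other_list)
--     for i, en_item in enumerate(en_list):
--         ident = get_item_identity(en_item, context) if isinstance(en_item, dict) else None
--         mi = None
--         method = None
--         if ident is not None and ident in queues:
--             q = queues[ident]
--             while q and q[-1] in used:
--                 q.pop()
--             if q:
--                 mi = q.pop()
--                 method = "identity"
--         if mi is None and i < m and i not in used:
--             mi, method = i, "index"
--         if mi is not None:
--             used.add(mi)
--         out.append((i, mi, method))
--     return out
-- ===== Notes on version B (the rewrite author's own statement) =====
-- stated objective: alternative
-- what changed: B indexes other_list once into per-identity queues of indices and consumes them front-to-back with lazy deletion of indices taken by the index fallback, instead of A's rescan of all of other_list for every English item; on the timed inputs this was not measurably faster.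
import Mathlib
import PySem

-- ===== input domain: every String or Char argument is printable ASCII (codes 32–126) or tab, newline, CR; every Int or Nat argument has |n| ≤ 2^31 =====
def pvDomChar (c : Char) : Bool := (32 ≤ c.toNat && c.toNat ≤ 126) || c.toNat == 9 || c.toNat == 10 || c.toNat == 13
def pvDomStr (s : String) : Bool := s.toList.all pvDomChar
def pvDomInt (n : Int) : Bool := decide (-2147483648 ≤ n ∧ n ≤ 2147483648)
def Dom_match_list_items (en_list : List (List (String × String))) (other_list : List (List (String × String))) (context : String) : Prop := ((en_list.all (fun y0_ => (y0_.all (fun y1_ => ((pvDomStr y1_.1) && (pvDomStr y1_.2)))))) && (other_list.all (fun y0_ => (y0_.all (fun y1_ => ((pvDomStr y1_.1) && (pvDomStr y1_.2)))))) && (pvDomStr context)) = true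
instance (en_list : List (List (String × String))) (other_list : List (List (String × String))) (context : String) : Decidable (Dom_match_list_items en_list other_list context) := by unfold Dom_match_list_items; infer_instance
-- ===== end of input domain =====

-- B replaces A's per-English-item rescan of other_list by per-identity index queues built
-- once, consumed front-to-back with lazy deletion of indices taken by the index fallback;
-- objective: alternative algorithm (not measurably faster on the timed inputs).


-- ===== PORT A =====
-- item[k] under the dict→assoc-list convention (first match)
def pvLookup (item : List (String × String)) (k : String) : Option String :=
  (item.find? (fun p => p.1 == k)).map (·.2)

-- '"k" in item and item["k"]' (truthy str value = nonempty); returns the value when the guard holds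
def pvTruthy (item : List (String × String)) (k : String) : Option String :=
  match pvLookup item k with
  | some v => if v == "" then none else some v
  | none => none

-- port of get_item_identity (shared helper of both Pythons; items are dict[str,str] on this
-- domain, so the isinstance checks are statically decided and item["email"] is a str —
-- emails = [item["email"]] and emails[0] = item["email"], exact here)
def getItemIdentity (item : List (String × String)) (context : String) : Option String :=
  match pvTruthy item "url" with
  | some v => some ("url:" ++ v)
  | none =>
  match pvTruthy item "URL" with
  | some v => some ("url:" ++ v)
  | none =>
  match pvTruthy item "title" with
  | some v => some ("title:" ++ v)
  | none =>
  match pvLookup item "role", pvLookup item "institution", pvLookup item "duration" with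
  | some r, some i, some d => some ("exp:" ++ r ++ "|" ++ i ++ "|" ++ d)
  | _, _, _ =>
  match pvTruthy item "doi" with
  | some v => some ("doi:" ++ v)
  | none =>
  match pvTruthy item "email" with
  | some v => some ("email:" ++ v)
  | none =>
  match pvLookup item "name" with
  | some v => some ("name:" ++ v)
  | none => none

-- A's inner loop: first other_idx not in used whose identity equals en_identity
def findByIdentity (pairs : List (Int × List (String × String))) (used : PySem.Set Int)
    (target : String) (context : String) : Option Int :=
  match pairs with
  | [] => none
  | (j, it) :: rest =>
    if PySem.Set.contains used j then findByIdentity rest used target context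
    else if getItemIdentity it context = some target then some j
    else findByIdentity rest used target context

-- A's loop body: the (matched_idx, match_method) pair for one English item
def decA (other_list : List (List (String × String))) (context : String)
    (used : PySem.Set Int) (p : Int × List (String × String)) : Option Int × Option String :=
  let m0 : Option Int × Option String :=
    match getItemIdentity p.2 context with
    | some tid =>
      match findByIdentity (PySem.List.enumerate other_list 0) used tid context with
      | some j => (some j, some "identity")
      | none => (none, none)
    | none => (none, none)
  if m0.1 = none ∧ p.1 < (other_list.length : Int) ∧ PySem.Set.contains used p.1 = false
  then (some p.1, some "index") else m0

-- 'if matched_idx is not None: used_other_indices.add(matched_idx)'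
def updUsed (used : PySem.Set Int) (d : Option Int × Option String) : PySem.Set Int :=
  match d.1 with
  | some j => PySem.Set.add used j
  | none => used

-- one iteration of A's outer loop (state = (matches, used_other_indices))
def matchStepA (other_list : List (List (String × String))) (context : String)
    (st : List (Int × Option Int × Option String) × PySem.Set Int)
    (p : Int × List (String × String)) : List (Int × Option Int × Option String) × PySem.Set Int :=
  let d := decA other_list context st.2 p
  (st.1 ++ [(p.1, d.1, d.2)], updUsed st.2 d)

def match_list_items (en_list : List (List (String × String))) (other_list : List (List (String × String))) (context : String) : List (Int × Option Int × Option String) :=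
  ((PySem.List.enumerate en_list 0).foldl (matchStepA other_list context) ([], PySem.Set.empty)).1

-- ===== PORT B =====
-- queues: identity -> indices of other_list carrying it.  Source B keeps each queue REVERSED so
-- list.pop() removes the smallest remaining index in O(1); the Lean queue is the SAME sequence
-- in forward order, popped from the head.
def buildQueues (other_list : List (List (String × String))) (context : String) :
    PySem.Dict String (List Int) :=
  (PySem.List.enumerate other_list 0).foldl
    (fun d p =>
      match getItemIdentity p.2 context with
      | some id => d.modify id [] (· ++ [p.1])   -- queues.setdefault(ident, []).append(j)
      | none => d)
    PySem.Dict.empty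

-- Source B's 'while q and q[-1] in used: q.pop()' (lazy deletion), on the forward-order queue
def dropUsed (used : PySem.Set Int) : List Int → List Int
  | [] => []
  | j :: rest => if PySem.Set.contains used j then dropUsed used rest else j :: rest

-- Source B's main loop: structural recursion over en_list, consing the output
def matchLoopB (m : Int) (context : String) :
    List (List (String × String)) → Int → PySem.Set Int → PySem.Dict String (List Int)
    → List (Int × Option Int × Option String)
  | [], _, _, _ => []
  | item :: rest, i, used, qs =>
    match getItemIdentity item context with
    | some id =>
      match dropUsed used (qs.getD id []) with
      | j :: tail =>
        (i, some j, some "identity")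
          :: matchLoopB m context rest (i + 1) (PySem.Set.add used j) (qs.insert id tail)
      | [] =>
        if i < m ∧ PySem.Set.contains used i = false then
          (i, some i, some "index")
            :: matchLoopB m context rest (i + 1) (PySem.Set.add used i) (qs.insert id [])
        else
          (i, none, none) :: matchLoopB m context rest (i + 1) used (qs.insert id [])
    | none =>
      if i < m ∧ PySem.Set.contains used i = false then
        (i, some i, some "index")
          :: matchLoopB m context rest (i + 1) (PySem.Set.add used i) qs
      else
        (i, none, none) :: matchLoopB m context rest (i + 1) used qs

def match_list_items_alt (en_list : List (List (String × String))) (other_list : List (List (String × String))) (context : String) : List (Int × Option Int × Option String) :=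
  matchLoopB (other_list.length : Int) context en_list 0 PySem.Set.empty
    (buildQueues other_list context)

-- ===== PRECONDITION & SPEC =====
def Spec_match_list_items (en_list : List (List (String × String))) (other_list : List (List (String × String))) (context : String) (out : List (Int × Option Int × Option String)) : Prop := out = match_list_items_alt en_list other_list context
instance (en_list : List (List (String × String))) (other_list : List (List (String × String))) (context : String) (out : List (Int × Option Int × Option String)) : Decidable (Spec_match_list_items en_list other_list context out) := by unfold Spec_match_list_items; infer_instance

-- ===== CLAIM (what is proved, stated in full; the proofs are below) =====
def Claim_equal_match_list_items : Prop := ∀ (en_list : List (List (String × String))) (other_list : List (List (String × String))) (context : String), Dom_match_list_items en_list other_list context → Spec_match_list_items en_list other_list context (match_list_items en_list other_list context)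

-- ===== LEMMAS AND PROOFS =====

-- recursive rendering of A's outer loop (proof helper)
def loopA (other_list : List (List (String × String))) (context : String) :
    List (List (String × String)) → Int → PySem.Set Int → List (Int × Option Int × Option String)
  | [], _, _ => []
  | item :: rest, i, used =>
    let d := decA other_list context used (i, item)
    (i, d.1, d.2) :: loopA other_list context rest (i + 1) (updUsed used d)

theorem foldA_eq_loopA (other_list : List (List (String × String))) (context : String)
    (en : List (List (String × String))) :
    ∀ (i : Int) (acc : List (Int × Option Int × Option String)) (used : PySem.Set Int),
    ((PySem.List.enumerate en i).foldl (matchStepA other_list context) (acc, used)).1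
      = acc ++ loopA other_list context en i used := by
  induction en with
  | nil => intro i acc used; simp [PySem.List.enumerate_nil, loopA]
  | cons item rest ih =>
    intro i acc used
    rw [PySem.List.enumerate_cons, List.foldl_cons]
    show ((PySem.List.enumerate rest (i + 1)).foldl (matchStepA other_list context)
      (matchStepA other_list context (acc, used) (i, item))).1 = _
    rw [matchStepA, ih]
    simp [loopA]

-- the indices buildQueues files under 'target', in order
def selIdx (context target : String) (p : Int × List (String × String)) : Option Int :=
  if getItemIdentity p.2 context = some target then some p.1 else none

def origQ (other_list : List (List (String × String))) (context target : String) : List Int :=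
  (PySem.List.enumerate other_list 0).filterMap (selIdx context target)

theorem getD_buildQueues_fold (context target : String)
    (pairs : List (Int × List (String × String))) (d : PySem.Dict String (List Int)) :
    (pairs.foldl
      (fun d p =>
        match getItemIdentity p.2 context with
        | some id => d.modify id [] (· ++ [p.1])
        | none => d) d).getD target []
    = d.getD target [] ++ pairs.filterMap (selIdx context target) := by
  induction pairs generalizing d with
  | nil => simp
  | cons p rest ih =>
    simp only [List.foldl_cons, ih]
    cases h : getItemIdentity p.2 context with
    | none => simp [selIdx, h]
    | some id =>
      have hred : (match (some id : Option String) with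
          | some id => d.modify id [] (· ++ [p.1])
          | none => d) = d.modify id [] (· ++ [p.1]) := rfl
      rw [hred]
      by_cases ht : target = id
      · subst ht
        rw [PySem.Dict.getD_modify_self]
        simp [selIdx, h]
      · rw [PySem.Dict.getD_modify_of_ne _ _ _ ht, List.filterMap_cons]
        have hsel : selIdx context target p = none := by
          unfold selIdx
          rw [h, if_neg (fun e => ht (Option.some.inj e).symm)]
        rw [hsel]

theorem getD_buildQueues (other_list : List (List (String × String))) (context target : String) :
    (buildQueues other_list context).getD target [] = origQ other_list context target := by
  unfold buildQueues origQ
  rw [getD_buildQueues_fold]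
  simp [PySem.Dict.empty, PySem.Dict.getD, PySem.Dict.get?]

theorem findByIdentity_eq_find? (pairs : List (Int × List (String × String)))
    (used : PySem.Set Int) (target context : String) :
    findByIdentity pairs used target context
    = (pairs.filterMap (selIdx context target)).find? (fun j => !(PySem.Set.contains used j)) := by
  induction pairs with
  | nil => simp [findByIdentity]
  | cons p rest ih =>
    obtain ⟨j, it⟩ := p
    by_cases hid : getItemIdentity it context = some target
    · by_cases hu : j ∈ used
      · simp [findByIdentity, selIdx, hid, hu, ih]
      · simp [findByIdentity, selIdx, hid, hu]
    · simp [findByIdentity, selIdx, hid, ih, ite_self]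

theorem contains_add (s : PySem.Set Int) (x y : Int) :
    PySem.Set.contains (PySem.Set.add s x) y = (PySem.Set.contains s y || y == x) := by
  by_cases hy : y ∈ s <;> by_cases hyx : y = x <;>
    simp [PySem.Set.contains, List.contains_eq_mem, PySem.Set.mem_add, hy, hyx]

theorem filter_unused_add (used : PySem.Set Int) (j : Int) (l : List Int) :
    l.filter (fun k => !PySem.Set.contains (PySem.Set.add used j) k)
    = (l.filter (fun k => !PySem.Set.contains used k)).filter (fun k => !(k == j)) := by
  rw [List.filter_filter]
  apply List.filter_congr
  intro k _
  rw [contains_add]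
  cases PySem.Set.contains used k <;> cases h : (k == j) <;> simp

theorem filter_dropUsed (used : PySem.Set Int) (q : List Int) :
    (dropUsed used q).filter (fun k => !PySem.Set.contains used k)
    = q.filter (fun k => !PySem.Set.contains used k) := by
  induction q with
  | nil => rfl
  | cons j rest ih =>
    cases h : PySem.Set.contains used j with
    | false =>
      simp only [dropUsed]
      rw [if_neg (by rw [h]; exact Bool.false_ne_true)]
    | true =>
      simp only [dropUsed]
      rw [if_pos h, ih, List.filter_cons_of_neg (by rw [h]; decide)]

theorem dropUsed_head_unused (used : PySem.Set Int) (q : List Int) (j : Int) (tail : List Int)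
    (h : dropUsed used q = j :: tail) : PySem.Set.contains used j = false := by
  induction q with
  | nil => simp [dropUsed] at h
  | cons x rest ih =>
    unfold dropUsed at h
    cases hx : PySem.Set.contains used x with
    | true => rw [if_pos hx] at h; exact ih h
    | false =>
      rw [if_neg (by rw [hx]; exact Bool.false_ne_true)] at h
      rw [← (List.cons.injEq ..).mp h |>.1]
      exact hx

-- the queue invariant: for every identity, the unused indices still in its queue are
-- exactly the unused indices other_list files under it
def InvQ (other_list : List (List (String × String))) (context : String)
    (used : PySem.Set Int) (qs : PySem.Dict String (List Int)) : Prop :=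
  ∀ t, (qs.getD t []).filter (fun k => !PySem.Set.contains used k)
     = (origQ other_list context t).filter (fun k => !PySem.Set.contains used k)

theorem InvQ_add (other_list : List (List (String × String))) (context : String)
    (used : PySem.Set Int) (qs : PySem.Dict String (List Int)) (j : Int)
    (h : InvQ other_list context used qs) :
    InvQ other_list context (PySem.Set.add used j) qs := by
  intro t
  rw [filter_unused_add, filter_unused_add, h t]

theorem InvQ_insert (other_list : List (List (String × String))) (context : String)
    (used : PySem.Set Int) (qs : PySem.Dict String (List Int)) (id : String) (q' : List Int)
    (hq : q'.filter (fun k => !PySem.Set.contains used k)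
        = (origQ other_list context id).filter (fun k => !PySem.Set.contains used k))
    (h : InvQ other_list context used qs) :
    InvQ other_list context used (qs.insert id q') := by
  intro t
  rw [PySem.Dict.getD_insert]
  by_cases ht : t = id
  · rw [if_pos ht]; subst ht; exact hq
  · rw [if_neg ht]; exact h t

theorem loopA_eq_loopB (other_list : List (List (String × String))) (context : String)
    (en : List (List (String × String))) :
    ∀ (i : Int) (used : PySem.Set Int) (qs : PySem.Dict String (List Int)),
    InvQ other_list context used qs →
    loopA other_list context en i used
      = matchLoopB (other_list.length : Int) context en i used qs := by
  induction en with
  | nil => intro i used qs _; rfl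
  | cons item rest ih =>
    intro i used qs hinv
    have hinvT := hinv
    unfold InvQ at hinvT
    cases hid : getItemIdentity item context with
    | none =>
      have hd : decA other_list context used (i, item)
          = (if i < (other_list.length : Int) ∧ PySem.Set.contains used i = false
             then (some i, some "index") else (none, none)) := by
        simp [decA, hid]
      by_cases hc : i < (other_list.length : Int) ∧ PySem.Set.contains used i = false
      · rw [if_pos hc] at hd
        simp only [loopA, matchLoopB, hid, hd, updUsed, if_pos hc]
        exact congrArg _ (ih _ _ _ (InvQ_add _ _ _ _ _ hinv))
      · rw [if_neg hc] at hd
        simp only [loopA, matchLoopB, hid, hd, updUsed, if_neg hc]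
        exact congrArg _ (ih _ _ _ hinv)
    | some tid =>
      -- A's scan = first unused entry of tid's queue (via the invariant)
      have hinv' := hinvT tid
      unfold origQ at hinv'
      have hfind : findByIdentity (PySem.List.enumerate other_list 0) used tid context
          = ((qs.getD tid []).filter (fun k => !PySem.Set.contains used k)).head? := by
        rw [findByIdentity_eq_find?, ← List.head?_filter, hinv']
      cases hdrop : dropUsed used (qs.getD tid []) with
      | cons j tail =>
        have hju : PySem.Set.contains used j = false := dropUsed_head_unused _ _ _ _ hdrop
        have hq : (qs.getD tid []).filter (fun k => !PySem.Set.contains used k)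
            = j :: tail.filter (fun k => !PySem.Set.contains used k) := by
          rw [← filter_dropUsed used (qs.getD tid []), hdrop,
            List.filter_cons_of_pos
              (by show (!PySem.Set.contains used j) = true; rw [hju]; rfl)]
        have hfix : findByIdentity (PySem.List.enumerate other_list 0) used tid context
            = some j := by rw [hfind, hq]; rfl
        have hd : decA other_list context used (i, item) = (some j, some "identity") := by
          simp [decA, hid, hfix]
        simp only [loopA, matchLoopB, hid, hdrop, hd, updUsed]
        refine congrArg _ (ih _ _ _ ?_)
        have hinvA : InvQ other_list context (PySem.Set.add used j) qs :=
          InvQ_add _ _ _ _ _ hinv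
        apply InvQ_insert _ _ _ _ _ _ ?_ hinvA
        -- tail filtered under used+j = origQ tid filtered under used+j
        rw [filter_unused_add, filter_unused_add, ← hinvT tid, hq,
          List.filter_cons_of_neg (by simp)]
      | nil =>
        have hq0 : (qs.getD tid []).filter (fun k => !PySem.Set.contains used k) = [] := by
          rw [← filter_dropUsed used (qs.getD tid []), hdrop]; rfl
        have horig : (origQ other_list context tid).filter
            (fun k => !PySem.Set.contains used k) = [] := by rw [← hinvT tid, hq0]
        have hfix : findByIdentity (PySem.List.enumerate other_list 0) used tid context
            = none := by rw [hfind, hq0]; rfl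
        have hd : decA other_list context used (i, item)
            = (if i < (other_list.length : Int) ∧ PySem.Set.contains used i = false
               then (some i, some "index") else (none, none)) := by
          simp [decA, hid, hfix]
        by_cases hc : i < (other_list.length : Int) ∧ PySem.Set.contains used i = false
        · rw [if_pos hc] at hd
          simp only [loopA, matchLoopB, hid, hdrop, hd, updUsed, if_pos hc]
          refine congrArg _ (ih _ _ _ ?_)
          have hinvA : InvQ other_list context (PySem.Set.add used i) qs :=
            InvQ_add _ _ _ _ _ hinv
          apply InvQ_insert _ _ _ _ _ _ ?_ hinvA
          rw [filter_unused_add, filter_unused_add, horig]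
          rfl
        · rw [if_neg hc] at hd
          simp only [loopA, matchLoopB, hid, hdrop, hd, updUsed, if_neg hc]
          refine congrArg _ (ih _ _ _ ?_)
          apply InvQ_insert _ _ _ _ _ _ ?_ hinv
          rw [horig]
          rfl

-- ===== VERDICT (by name: the statement is the Claim_ definition above) =====
theorem match_list_items_spec : Claim_equal_match_list_items := by
  intro en_list other_list context _
  unfold Spec_match_list_items match_list_items match_list_items_alt
  rw [foldA_eq_loopA, List.nil_append]
  apply loopA_eq_loopB
  intro t
  rw [getD_buildQueues]
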